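-- pv_equiv track=rewrite | github.com/Coridoris/tesis_cori | Códigos/pre_red.py | find_verb_noun_adj_pairs
-- ===== SOURCE A (Python) =====
-- def find_verb_noun_adj_pairs(tagged_words):
--     target_tags = ['NOUN', 'VERB', 'ADJ']
--     pairs = []
--
--     # Eliminar tuplas con etiqueta 'PUNCT'
--     filtered_words = [(word, tag) for word, tag in tagged_words if tag != 'PUNCT']
--
--     for i in range(len(filtered_words) - 1):
--         word, tag = filtered_words[i]
--         next_word, next_tag = filtered_words[i + 1]
--
--         if tag in target_tags and next_tag in target_tags:
--             if tag == 'VERB' and (next_tag == 'NOUN' or next_tag == 'ADJ' or next_tag == 'VERB'):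
--                 pairs.append((tag, next_tag))
--             elif tag == 'ADJ' and (next_tag == 'NOUN' or next_tag == 'ADJ' or next_tag == 'VERB'):
--                 pairs.append((tag, next_tag))
--             elif tag == 'NOUN' and (next_tag == 'NOUN' or next_tag == 'ADJ' or next_tag == 'VERB'):
--                 pairs.append((tag, next_tag))
--
--     return pairs
-- ===== SOURCE B (Python) =====
-- def find_verb_noun_adj_pairs(tagged_words):
--     # Run-segmentation: split the non-PUNCT tag stream into maximal runs of
--     # NOUN/VERB/ADJ tags, then pair up each run with zip(run, run[1:]).
--     targets = ('NOUN', 'VERB', 'ADJ')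
--     runs = []
--     cur = []
--     for _, tag in tagged_words:
--         if tag == 'PUNCT':
--             continue
--         if tag in targets:
--             cur.append(tag)
--         else:
--             if cur:
--                 runs.append(cur)
--             cur = []
--     if cur:
--         runs.append(cur)
--     return [pair for run in runs for pair in zip(run, run[1:])]
-- ===== Notes on version B (the rewrite author's own statement) =====
-- stated objective: alternative
-- what changed: Replaces A's filter-then-index-adjacent-pairs scan by run segmentation: the non-PUNCT tag stream is split into maximal runs of NOUN/VERB/ADJ tags and each run is paired with zip(run, run[1:]), with no per-pair membership tests.
import Mathlib
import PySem

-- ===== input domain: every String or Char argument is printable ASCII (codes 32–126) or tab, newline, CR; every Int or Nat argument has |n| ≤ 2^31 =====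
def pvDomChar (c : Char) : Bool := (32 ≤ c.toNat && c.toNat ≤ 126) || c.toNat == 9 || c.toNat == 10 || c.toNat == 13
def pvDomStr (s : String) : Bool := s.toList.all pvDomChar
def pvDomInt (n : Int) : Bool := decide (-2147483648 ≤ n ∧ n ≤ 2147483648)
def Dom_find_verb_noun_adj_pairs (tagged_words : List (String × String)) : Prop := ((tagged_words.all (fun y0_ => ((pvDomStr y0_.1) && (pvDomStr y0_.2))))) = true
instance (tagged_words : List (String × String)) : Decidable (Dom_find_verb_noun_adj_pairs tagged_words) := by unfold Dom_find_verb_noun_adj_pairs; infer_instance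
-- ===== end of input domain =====

-- B replaces A's filter-then-adjacent-index scan by run segmentation: split the non-PUNCT
-- tag stream into maximal NOUN/VERB/ADJ runs, then pair each run with zip (objective: alternative).

-- ===== PORT A =====
def pvTargetsA : List String := ["NOUN", "VERB", "ADJ"]

-- the 'for i in range(len(filtered_words)-1)' loop, as structural recursion over adjacent pairs
def pvLoopA : List (String × String) → List (String × String)
  | (_, tag) :: (next_word, next_tag) :: rest =>
      (if tag ∈ pvTargetsA ∧ next_tag ∈ pvTargetsA then
        (if tag = "VERB" ∧ (next_tag = "NOUN" ∨ next_tag = "ADJ" ∨ next_tag = "VERB") then [(tag, next_tag)]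
         else if tag = "ADJ" ∧ (next_tag = "NOUN" ∨ next_tag = "ADJ" ∨ next_tag = "VERB") then [(tag, next_tag)]
         else if tag = "NOUN" ∧ (next_tag = "NOUN" ∨ next_tag = "ADJ" ∨ next_tag = "VERB") then [(tag, next_tag)]
         else [])
       else []) ++ pvLoopA ((next_word, next_tag) :: rest)
  | _ => []

def find_verb_noun_adj_pairs (tagged_words : List (String × String)) : List (String × String) :=
  pvLoopA (tagged_words.filter (fun wt => wt.2 != "PUNCT"))

-- ===== PORT B =====
def pvTargetsB : List String := ["NOUN", "VERB", "ADJ"]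

-- zip(run, run[1:])
def pvPairsOf (run : List String) : List (String × String) := run.zip run.tail

-- one iteration of Source B's loop over (runs, cur)
def pvStepB (st : List (List String) × List String) (wt : String × String) :
    List (List String) × List String :=
  if wt.2 = "PUNCT" then st
  else if wt.2 ∈ pvTargetsB then (st.1, st.2 ++ [wt.2])
  else ((if st.2 = [] then st.1 else st.1 ++ [st.2]), [])

def find_verb_noun_adj_pairs_alt (tagged_words : List (String × String)) : List (String × String) :=
  let st := tagged_words.foldl pvStepB ([], [])
  let runs := if st.2 = [] then st.1 else st.1 ++ [st.2]
  runs.flatMap pvPairsOf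

-- ===== PRECONDITION & SPEC =====
def Spec_find_verb_noun_adj_pairs (tagged_words : List (String × String)) (out : List (String × String)) : Prop := out = find_verb_noun_adj_pairs_alt tagged_words
instance (tagged_words : List (String × String)) (out : List (String × String)) : Decidable (Spec_find_verb_noun_adj_pairs tagged_words out) := by unfold Spec_find_verb_noun_adj_pairs; infer_instance

-- ===== CLAIM (what is proved, stated in full; the proofs are below) =====
def Claim_equal_find_verb_noun_adj_pairs : Prop := ∀ (tagged_words : List (String × String)), Dom_find_verb_noun_adj_pairs tagged_words → Spec_find_verb_noun_adj_pairs tagged_words (find_verb_noun_adj_pairs tagged_words)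

-- ===== LEMMAS AND PROOFS =====

-- prev-tag pair generator on the filtered list (intermediate between A and B)
def pvPF : Option String → List (String × String) → List (String × String)
  | _, [] => []
  | none, (_, t) :: r => pvPF (some t) r
  | some p, (_, t) :: r =>
      (if p ∈ pvTargetsA ∧ t ∈ pvTargetsA then [(p, t)] else []) ++ pvPF (some t) r

-- run-building generator on the filtered list (intermediate for B)
def pvG : List String → List (String × String) → List (String × String)
  | cur, [] => pvPairsOf cur
  | cur, wt :: r =>
      if wt.2 ∈ pvTargetsA then pvG (cur ++ [wt.2]) r else pvPairsOf cur ++ pvG [] r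

-- A's elif cascade collapses to the membership test
theorem pvCascade (t t2 : String) :
    (if t ∈ pvTargetsA ∧ t2 ∈ pvTargetsA then
      (if t = "VERB" ∧ (t2 = "NOUN" ∨ t2 = "ADJ" ∨ t2 = "VERB") then [(t, t2)]
       else if t = "ADJ" ∧ (t2 = "NOUN" ∨ t2 = "ADJ" ∨ t2 = "VERB") then [(t, t2)]
       else if t = "NOUN" ∧ (t2 = "NOUN" ∨ t2 = "ADJ" ∨ t2 = "VERB") then [(t, t2)]
       else [])
     else []) = (if t ∈ pvTargetsA ∧ t2 ∈ pvTargetsA then [(t, t2)] else []) := by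
  by_cases h : t ∈ pvTargetsA ∧ t2 ∈ pvTargetsA
  · obtain ⟨h1, h2⟩ := h
    simp only [pvTargetsA, List.mem_cons, List.not_mem_nil, or_false] at h1 h2
    rcases h1 with h1 | h1 | h1 <;> rcases h2 with h2 | h2 | h2 <;> subst h1 <;> subst h2 <;> simp [pvTargetsA]
  · simp [h]

theorem pvLoopA_eq_pvPF_some : ∀ (fs : List (String × String)) (p w : String),
    pvLoopA ((w, p) :: fs) = pvPF (some p) fs := by
  intro fs
  induction fs with
  | nil => intro p w; rfl
  | cons hd tl ih =>
      intro p w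
      obtain ⟨w2, t2⟩ := hd
      rw [pvLoopA, pvPF, pvCascade, ih]

theorem pvLoopA_eq_pvPF_none (fs : List (String × String)) : pvLoopA fs = pvPF none fs := by
  cases fs with
  | nil => rfl
  | cons hd tl =>
      obtain ⟨w, t⟩ := hd
      rw [pvPF, pvLoopA_eq_pvPF_some]

theorem pvPairsOf_cons₂ (a b : String) (l : List String) :
    pvPairsOf (a :: b :: l) = (a, b) :: pvPairsOf (b :: l) := by
  simp [pvPairsOf]

theorem pvPairsOf_snoc : ∀ (l : List String) (p t : String),
    pvPairsOf ((l ++ [p]) ++ [t]) = pvPairsOf (l ++ [p]) ++ [(p, t)] := by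
  intro l
  induction l with
  | nil => intro p t; simp [pvPairsOf]
  | cons a l ih =>
      intro p t
      cases l with
      | nil => simp [pvPairsOf]
      | cons b l' =>
          have h1 : ((a :: b :: l') ++ [p]) ++ [t] = a :: (((b :: l') ++ [p]) ++ [t]) := by simp
          have h2 : (a :: b :: l') ++ [p] = a :: ((b :: l') ++ [p]) := by simp
          rw [h1, h2]
          have h3 : ((b :: l') ++ [p]) ++ [t] = b :: ((l' ++ [p]) ++ [t]) := by simp
          have h4 : (b :: l') ++ [p] = b :: (l' ++ [p]) := by simp
          rw [h3, pvPairsOf_cons₂, ← h3, ih, h4, pvPairsOf_cons₂, ← h4]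
          simp

-- joint correspondence between the run generator and the prev-tag generator
theorem pvG_pvPF : ∀ (ys : List (String × String)),
    (∀ (cs : List String) (p : String), p ∈ pvTargetsA →
      pvG (cs ++ [p]) ys = pvPairsOf (cs ++ [p]) ++ pvPF (some p) ys) ∧
    (∀ p : String, p ∉ pvTargetsA → pvPF (some p) ys = pvG [] ys) := by
  intro ys
  induction ys with
  | nil =>
      constructor
      · intro cs p _; simp [pvG, pvPF]
      · intro p _; simp [pvG, pvPF, pvPairsOf]
  | cons hd r ih =>
      obtain ⟨w, t⟩ := hd
      obtain ⟨ih1, ih2⟩ := ih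
      constructor
      · intro cs p hp
        by_cases ht : t ∈ pvTargetsA
        · rw [pvG]
          simp only [ht, if_pos]
          rw [ih1 (cs ++ [p]) t ht, pvPairsOf_snoc, pvPF]
          simp [hp, ht]
        · rw [pvG]
          simp only [ht, ite_false]
          rw [pvPF]
          have : ¬ (p ∈ pvTargetsA ∧ t ∈ pvTargetsA) := fun h => ht h.2
          simp only [this, ite_false]
          rw [ih2 t ht]
          simp
      · intro p hp
        rw [pvPF]
        have : ¬ (p ∈ pvTargetsA ∧ t ∈ pvTargetsA) := fun h => hp h.1
        simp only [this, ite_false]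
        by_cases ht : t ∈ pvTargetsA
        · rw [pvG]
          simp only [ht, if_pos]
          have := ih1 [] t ht
          simpa [pvPairsOf] using this.symm
        · rw [pvG]
          simp only [ht, ite_false]
          rw [ih2 t ht]
          simp [pvPairsOf]

theorem pvPF_none_eq_pvG (ys : List (String × String)) : pvPF none ys = pvG [] ys := by
  cases ys with
  | nil => rfl
  | cons hd r =>
      obtain ⟨w, t⟩ := hd
      rw [pvPF]
      by_cases ht : t ∈ pvTargetsA
      · rw [pvG]
        simp only [ht, if_pos]
        have := (pvG_pvPF r).1 [] t ht
        simpa [pvPairsOf] using this.symm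
      · rw [pvG]
        simp only [ht, ite_false]
        rw [(pvG_pvPF r).2 t ht]
        simp [pvPairsOf]

-- B's fold computes the run generator over the filtered list
theorem pvFoldB_eq : ∀ (xs : List (String × String)) (runs : List (List String)) (cur : List String),
    (let st := xs.foldl pvStepB (runs, cur);
     (if st.2 = [] then st.1 else st.1 ++ [st.2]).flatMap pvPairsOf)
    = runs.flatMap pvPairsOf ++ pvG cur (xs.filter (fun wt => wt.2 != "PUNCT")) := by
  intro xs
  induction xs with
  | nil =>
      intro runs cur
      by_cases hc : cur = []
      · simp [hc, pvG, pvPairsOf]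
      · simp [hc, pvG]
  | cons hd tl ih =>
      intro runs cur
      obtain ⟨w, t⟩ := hd
      by_cases hp : t = "PUNCT"
      · have hstep : pvStepB (runs, cur) (w, t) = (runs, cur) := by simp [pvStepB, hp]
        simp only [List.foldl_cons, hstep]
        rw [ih]
        simp [hp]
      · have hfil : ((w, t) :: tl).filter (fun wt => wt.2 != "PUNCT")
            = (w, t) :: tl.filter (fun wt => wt.2 != "PUNCT") := by simp [hp]
        by_cases ht : t ∈ pvTargetsB
        · have hstep : pvStepB (runs, cur) (w, t) = (runs, cur ++ [t]) := by
            simp [pvStepB, hp, ht]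
          simp only [List.foldl_cons, hstep]
          rw [ih, hfil, pvG]
          have ht' : t ∈ pvTargetsA := ht
          simp [ht']
        · have hstep : pvStepB (runs, cur) (w, t)
              = ((if cur = [] then runs else runs ++ [cur]), []) := by
            simp [pvStepB, hp, ht]
          simp only [List.foldl_cons, hstep]
          rw [ih, hfil, pvG]
          have ht' : t ∉ pvTargetsA := ht
          by_cases hc : cur = []
          · simp [hc, ht', pvPairsOf]
          · simp [hc, ht']

-- ===== VERDICT (by name: the statement is the Claim_ definition above) =====
theorem find_verb_noun_adj_pairs_spec : Claim_equal_find_verb_noun_adj_pairs := by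
  intro tagged_words _
  unfold Spec_find_verb_noun_adj_pairs find_verb_noun_adj_pairs find_verb_noun_adj_pairs_alt
  rw [pvLoopA_eq_pvPF_none, pvPF_none_eq_pvG, pvFoldB_eq]
  simp
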